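-- pv_equiv track=rewrite | github.com/HanYining/Anomaly-Speed | speed_cal.py | get_consecutive_sequence
-- ===== SOURCE A (Python) =====
-- def get_consecutive_sequence(frames, tolerance=1):
--     # this function should be easy if we know our anomaly detection
--     # have 100% accuracy, but it turns out not the case.
--     # the car can be partitioned by certain mistakes,
--     # which resulted that at certain frame, the tiles represent the car
--     # might not be continuous, etc [1,2,4,5], here 3 is a false negative.
--     # here in order to give a robust speed estimate
--     # we need to track the sequence of anomaly tiles over each frame.
--     # to increase the robustness of the longest subsequence in this case
--     # I defined a tolerance with default=1 that represent the amount of gap lengths between anomaly tiles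
--     # and restore the separate tiles like [1,2,4,5] back into [1,2,3,4,5]
--     """
--     :param frames: a dictionary with frame id as keys and anomaly tiles as values.
--     :return: a new dictionary with frame id as keys and corresponding consecutive anomaly tiles as values
--     """
--     frames2 = {}
--     for frame in frames.keys():
--         sequence = frames[frame]
--         if len(sequence)<3:
--             continue
--         left = sequence[0]
--         right = sequence[0]
--         for i in range(len(sequence)-1):
--             if sequence[i]+1+tolerance >= sequence[i+1]:
--                 right = sequence[i+1]
--             elif right-left<2:
--                 right = sequence[i+1]
--                 left = sequence[i+1]
--             else:
--                 break
--         if right-left>=2: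
--             frames2[frame] = [i for i in range(left,right+1)]
--     return frames2
-- ===== SOURCE B (Python) =====
-- def get_consecutive_sequence(frames, tolerance=1):
--     # Two-level rewrite: an inner two-pointer scan that consumes one maximal run
--     # at a time (and drops the consumed prefix), wrapped in a dict comprehension,
--     # replacing A's single-pass left/right reset-and-break state machine.
--     def pick(xs):
--         # first maximal run (by the gap test) whose value span is >= 2, else None
--         while xs:
--             first = xs[0]
--             last = first
--             k = 1
--             while k < len(xs) and last + 1 + tolerance >= xs[k]:
--                 last = xs[k]
--                 k += 1
--             if last - first >= 2:
--                 return (first, last)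
--             xs = xs[k:]
--         return None
--
--     return {frame: list(range(run[0], run[1] + 1))
--             for frame, run in ((f, pick(s)) for f, s in frames.items() if len(s) >= 3)
--             if run is not None}
-- ===== Notes on version B (the rewrite author's own statement) =====
-- stated objective: alternative
-- what changed: Replaced A's fold with a left/right reset-and-break state machine and dict inserts by a run-consuming two-pointer picker (consume one maximal run, test its span, drop it and retry) inside a dict comprehension over the items.
import Mathlib
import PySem

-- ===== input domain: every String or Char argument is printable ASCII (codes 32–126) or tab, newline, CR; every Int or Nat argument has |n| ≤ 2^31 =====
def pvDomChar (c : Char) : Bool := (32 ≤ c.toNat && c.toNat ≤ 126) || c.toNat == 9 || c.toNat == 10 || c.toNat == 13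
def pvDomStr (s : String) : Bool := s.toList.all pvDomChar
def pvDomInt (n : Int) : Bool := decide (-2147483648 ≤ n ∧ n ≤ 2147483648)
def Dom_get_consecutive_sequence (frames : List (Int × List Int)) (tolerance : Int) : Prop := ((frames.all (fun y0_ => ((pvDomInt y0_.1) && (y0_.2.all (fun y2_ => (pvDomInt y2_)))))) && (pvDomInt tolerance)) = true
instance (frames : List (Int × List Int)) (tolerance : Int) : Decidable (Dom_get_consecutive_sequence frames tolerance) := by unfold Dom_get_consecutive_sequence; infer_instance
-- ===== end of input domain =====

-- B replaces A's fold-with-inserts state machine by a run-consuming two-pointer picker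
-- inside a dict comprehension (objective: alternative decomposition).

-- ===== PORT A =====
-- inner loop of A: i runs over range(len(sequence)-1); state (left, right), prev = sequence[i]
-- (prev always equals right in A's code), cur = sequence[i+1]; 'break' = returning (left, right)
def pvLoopA (tolerance left right prev : Int) : List Int → Int × Int
  | [] => (left, right)
  | cur :: rest =>
    if prev + 1 + tolerance ≥ cur then pvLoopA tolerance left cur cur rest
    else if right - left < 2 then pvLoopA tolerance cur cur cur rest
    else (left, right)

def get_consecutive_sequence (frames : List (Int × List Int)) (tolerance : Int) : List (Int × List Int) :=
  let d := PySem.Dict.ofList frames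
  (d.keys.foldl (fun frames2 frame =>
      let sequence := d.getD frame []
      if sequence.length < 3 then frames2
      else
        match sequence with
        | [] => frames2  -- unreachable: length ≥ 3
        | s0 :: rest =>
          let lr := pvLoopA tolerance s0 s0 s0 rest
          if lr.2 - lr.1 ≥ 2 then frames2.insert frame (PySem.List.pyRange lr.1 (lr.2 + 1) 1)
          else frames2)
    PySem.Dict.empty).items

-- ===== PORT B =====
-- B's inner while-loop: consume the current maximal run (last, remaining suffix)
def pvTakeRun (tolerance prev : Int) : List Int → Int × List Int
  | [] => (prev, [])
  | cur :: rest =>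
    if prev + 1 + tolerance ≥ cur then pvTakeRun tolerance cur rest else (prev, cur :: rest)

theorem pvTakeRun_len (tolerance prev : Int) : ∀ l : List Int,
    (pvTakeRun tolerance prev l).2.length ≤ l.length := by
  intro l
  induction l generalizing prev with
  | nil => simp [pvTakeRun]
  | cons cur rest ih =>
    simp only [pvTakeRun]
    split
    · exact le_trans (ih cur) (Nat.le_succ _)
    · simp

-- B's outer while-loop: take a run, return it if its span is ≥ 2, else drop it and retry
def pvPick (tolerance : Int) : List Int → Option (Int × Int)
  | [] => none
  | x :: xs =>
    let tr := pvTakeRun tolerance x xs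
    if tr.1 - x ≥ 2 then some (x, tr.1) else pvPick tolerance tr.2
termination_by l => l.length
decreasing_by
  simpa using Nat.lt_succ_of_le (pvTakeRun_len tolerance x xs)

def get_consecutive_sequence_alt (frames : List (Int × List Int)) (tolerance : Int) : List (Int × List Int) :=
  (PySem.Dict.ofList frames).items.filterMap (fun kv =>
    if kv.2.length < 3 then none
    else (pvPick tolerance kv.2).map (fun run => (kv.1, PySem.List.pyRange run.1 (run.2 + 1) 1)))

-- ===== PRECONDITION & SPEC =====
def Spec_get_consecutive_sequence (frames : List (Int × List Int)) (tolerance : Int) (out : List (Int × List Int)) : Prop := out = get_consecutive_sequence_alt frames tolerance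
instance (frames : List (Int × List Int)) (tolerance : Int) (out : List (Int × List Int)) : Decidable (Spec_get_consecutive_sequence frames tolerance out) := by unfold Spec_get_consecutive_sequence; infer_instance

-- ===== CLAIM (what is proved, stated in full; the proofs are below) =====
def Claim_equal_get_consecutive_sequence : Prop := ∀ (frames : List (Int × List Int)) (tolerance : Int), Dom_get_consecutive_sequence frames tolerance → Spec_get_consecutive_sequence frames tolerance (get_consecutive_sequence frames tolerance)

-- ===== LEMMAS AND PROOFS =====

-- A's loop, filtered by the final span test, equals "finish the current run, then pick"
theorem pvLoopA_eq (tolerance : Int) : ∀ (l : List Int) (first prev : Int),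
    (if (pvLoopA tolerance first prev prev l).2 - (pvLoopA tolerance first prev prev l).1 ≥ 2
      then some (pvLoopA tolerance first prev prev l) else none)
    = (if (pvTakeRun tolerance prev l).1 - first ≥ 2
        then some (first, (pvTakeRun tolerance prev l).1)
        else pvPick tolerance (pvTakeRun tolerance prev l).2) := by
  intro l
  induction l with
  | nil => intro first prev; simp [pvLoopA, pvTakeRun, pvPick]
  | cons cur rest ih =>
    intro first prev
    by_cases h : prev + 1 + tolerance ≥ cur
    · simp only [pvLoopA, pvTakeRun, if_pos h]
      exact ih first cur
    · have h2 : ¬ (prev + 1 + tolerance ≥ cur) := h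
      by_cases hs : prev - first < 2
      · have hns : ¬ (prev - first ≥ 2) := by omega
        simp only [pvLoopA, pvTakeRun, if_neg h2, if_pos hs, if_neg hns]
        rw [ih cur cur]
        simp [pvPick]
      · have hys : prev - first ≥ 2 := by omega
        simp [pvLoopA, pvTakeRun, h2, hs, hys]

-- corollary: the filtered loop result is exactly B's picker
theorem pvLoopA_pick (tolerance x : Int) (xs : List Int) :
    (if (pvLoopA tolerance x x x xs).2 - (pvLoopA tolerance x x x xs).1 ≥ 2
      then some (pvLoopA tolerance x x x xs) else none)
    = pvPick tolerance (x :: xs) := by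
  rw [pvLoopA_eq tolerance xs x x]
  simp [pvPick]

-- folding conditional inserts of fresh distinct keys into a dict appends the kept pairs
theorem foldl_insert_opt (g : Int → Option (List Int)) :
    ∀ (ks : List Int) (d : PySem.Dict Int (List Int)), ks.Nodup →
    (∀ k ∈ ks, d.contains k = false) →
    (ks.foldl (fun acc k => match g k with | some p => acc.insert k p | none => acc) d).items
      = d.items ++ ks.filterMap (fun k => (g k).map (fun p => (k, p))) := by
  intro ks
  induction ks with
  | nil => intro d _ _; simp
  | cons k ks ih =>
    intro d hnd hfresh
    have hk : d.contains k = false := hfresh k (List.mem_cons_self)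
    have hnd' : ks.Nodup := hnd.of_cons
    have hkn : k ∉ ks := (List.nodup_cons.mp hnd).1
    simp only [List.foldl_cons, List.filterMap_cons]
    cases hg : g k with
    | none =>
      rw [ih d hnd' (fun k' hk' => hfresh k' (List.mem_cons_of_mem _ hk'))]
      simp
    | some p =>
      have hfresh' : ∀ k' ∈ ks, (d.insert k p).contains k' = false := by
        intro k' hk'
        rw [PySem.Dict.contains_insert]
        have : k' ≠ k := fun he => hkn (he ▸ hk')
        simp [this, hfresh k' (List.mem_cons_of_mem _ hk')]
      rw [ih (d.insert k p) hnd' hfresh',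
          PySem.Dict.items_insert_of_not_contains d p hk]
      simp

-- per-key payload of A, as an option
theorem pvStep_eq (tolerance : Int) (acc : PySem.Dict Int (List Int)) (frame : Int)
    (sequence : List Int) :
    (if sequence.length < 3 then acc
      else
        match sequence with
        | [] => acc
        | s0 :: rest =>
          let lr := pvLoopA tolerance s0 s0 s0 rest
          if lr.2 - lr.1 ≥ 2 then acc.insert frame (PySem.List.pyRange lr.1 (lr.2 + 1) 1)
          else acc)
    = (match (if sequence.length < 3 then none
              else (pvPick tolerance sequence).map
                    (fun run => PySem.List.pyRange run.1 (run.2 + 1) 1)) with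
        | some p => acc.insert frame p
        | none => acc) := by
  by_cases hlen : sequence.length < 3
  · simp [hlen]
  · cases sequence with
    | nil => simp at hlen
    | cons s0 rest =>
      simp only [if_neg hlen]
      rw [← pvLoopA_pick tolerance s0 rest]
      by_cases hs : (pvLoopA tolerance s0 s0 s0 rest).2 - (pvLoopA tolerance s0 s0 s0 rest).1 ≥ 2
      · simp [hs]
      · simp [hs]

theorem get_consecutive_sequence_eq (frames : List (Int × List Int)) (tolerance : Int) :
    get_consecutive_sequence frames tolerance = get_consecutive_sequence_alt frames tolerance := by
  unfold get_consecutive_sequence get_consecutive_sequence_alt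
  simp only []
  set d := PySem.Dict.ofList frames with hd
  have hnd : d.keys.Nodup := PySem.Dict.nodup_keys_ofList frames
  -- rewrite A's fold body into the option-match shape
  have hstep : (fun (acc : PySem.Dict Int (List Int)) (frame : Int) =>
      let sequence := d.getD frame []
      if sequence.length < 3 then acc
      else
        match sequence with
        | [] => acc
        | s0 :: rest =>
          let lr := pvLoopA tolerance s0 s0 s0 rest
          if lr.2 - lr.1 ≥ 2 then acc.insert frame (PySem.List.pyRange lr.1 (lr.2 + 1) 1)
          else acc)
    = (fun acc frame =>
        match (if (d.getD frame []).length < 3 then none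
               else (pvPick tolerance (d.getD frame [])).map
                      (fun run => PySem.List.pyRange run.1 (run.2 + 1) 1)) with
        | some p => acc.insert frame p
        | none => acc) := by
    funext acc frame
    exact pvStep_eq tolerance acc frame (d.getD frame [])
  rw [hstep,
      foldl_insert_opt _ d.keys PySem.Dict.empty hnd (fun k _ => PySem.Dict.contains_empty k),
      PySem.Dict.items_eq_map_keys d hnd ([] : List Int), List.filterMap_map]
  simp only [show PySem.Dict.empty.items = ([] : List (Int × List Int)) from rfl, List.nil_append]
  apply List.filterMap_congr
  intro k _
  by_cases hlen : (d.getD k []).length < 3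
  · simp [hlen]
  · simp [hlen, Option.map_map, Function.comp_def]

-- ===== VERDICT (by name: the statement is the Claim_ definition above) =====
theorem get_consecutive_sequence_spec : Claim_equal_get_consecutive_sequence := by
  intro frames tolerance _
  exact get_consecutive_sequence_eq frames tolerance
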